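-- pv_equiv track=rewrite | github.com/8080509/Number_Theory | PinnacleActions1.py | uLFac
-- ===== SOURCE A (Python) =====
-- def uLFac(pi, x):
-- 	U = [[]]
-- 	L = []
-- 	piIter = iter(pi)
-- 	val = next(piIter)
-- 	try:
-- 		while True:
-- 			while val >= x:
-- 				U[-1].append(val)
-- 				val = next(piIter)
-- 			U.append([])
-- 			L.append([])
-- 			while val < x:
-- 				L[-1].append(val)
-- 				val = next(piIter)
-- 	except StopIteration:
-- 		pass
-- 	except: raise
-- 	return U, L
-- ===== SOURCE B (Python) =====
-- def uLFac(pi, x):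
--     # Pass 1: group pi into maximal runs keyed by (v >= x).
--     runs = []
--     for v in pi:
--         k = v >= x
--         if runs and runs[-1][0] == k:
--             runs[-1][1].append(v)
--         else:
--             runs.append((k, [v]))
--     # Pass 2: distribute the runs into the alternating U/L block structure.
--     U, L = [[]], []
--     for k, run in runs:
--         if k:
--             U[-1].extend(run)
--         else:
--             U.append([])
--             L.append(run)
--     return U, L
-- ===== Notes on version B (the rewrite author's own statement) =====
-- stated objective: alternative
-- what changed: Replaces A's exception-driven nested while loops over an iterator by a two-pass build-then-distribute: first group the list into maximal runs keyed by (v >= x), then distribute the runs into the alternating U/L block structure.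
-- crash fix: On the empty list A raises StopIteration (the initial next() outside the try); B returns ([[]], []). — e.g. on uLFac([], 0): A raises StopIteration, B returns ([[]], [])
import Mathlib
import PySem

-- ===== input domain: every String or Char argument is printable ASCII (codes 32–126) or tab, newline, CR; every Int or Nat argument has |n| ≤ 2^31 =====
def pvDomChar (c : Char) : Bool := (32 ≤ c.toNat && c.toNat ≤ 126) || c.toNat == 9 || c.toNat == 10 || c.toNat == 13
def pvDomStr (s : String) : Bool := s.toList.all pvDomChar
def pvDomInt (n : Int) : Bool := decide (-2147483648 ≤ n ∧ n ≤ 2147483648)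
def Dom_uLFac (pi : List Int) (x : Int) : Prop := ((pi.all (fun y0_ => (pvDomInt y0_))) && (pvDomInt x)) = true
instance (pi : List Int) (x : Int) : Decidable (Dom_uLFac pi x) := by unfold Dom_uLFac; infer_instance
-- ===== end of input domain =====

-- B replaces A's exception-driven nested while loops by a two-pass group-into-runs
-- then distribute-runs formulation (alternative decomposition, same cost).


-- ===== PORT A =====
-- A's `U[-1].append(val)` on a nonempty list of blocks
def pvPushLast : List (List Int) → Int → List (List Int)
  | [], _ => []
  | [b], v => [b ++ [v]]
  | b :: c :: bs, v => b :: pvPushLast (c :: bs) v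

-- A's loop: phase = true while in the `val >= x` inner loop, false in the `val < x` one;
-- `val` is the current iterator value, `rest` the unconsumed tail; StopIteration = rest exhausted.
def uLFacGo (x : Int) (phase : Bool) (val : Int) (rest : List Int)
    (U L : List (List Int)) : List (List Int) × List (List Int) :=
  if phase then
    if x ≤ val then
      match rest with
      | [] => (pvPushLast U val, L)
      | v :: rs => uLFacGo x true v rs (pvPushLast U val) L
    else
      uLFacGo x false val rest (U ++ [[]]) (L ++ [[]])
  else
    if val < x then
      match rest with
      | [] => (U, pvPushLast L val)
      | v :: rs => uLFacGo x false v rs U (pvPushLast L val)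
    else
      uLFacGo x true val rest U L
termination_by 2 * rest.length + (if (if phase then x ≤ val else val < x) then 0 else 1)
decreasing_by all_goals (simp_all; split_ifs <;> omega)

-- `val = next(piIter)` before the try: on [] the Python raises StopIteration (outside Pre_).
def uLFac (pi : List Int) (x : Int) : List (List Int) × List (List Int) :=
  match pi with
  | [] => ([[]], [])
  | v :: rs => uLFacGo x true v rs [[]] []

-- ===== PORT B =====
-- pass 1 step: extend the last run if its key matches k, else append a new run (k, [v])
def pvAddRun : List (Bool × List Int) → Bool → Int → List (Bool × List Int)
  | [], k, v => [(k, [v])]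
  | [r], k, v => if r.1 == k then [(r.1, r.2 ++ [v])] else [r, (k, [v])]
  | r :: s :: rs, k, v => r :: pvAddRun (s :: rs) k v

-- B's `U[-1].extend(run)`
def pvExtendLast : List (List Int) → List Int → List (List Int)
  | [], _ => []
  | [b], s => [b ++ s]
  | b :: c :: bs, s => b :: pvExtendLast (c :: bs) s

-- pass 2 step: distribute one run into (U, L)
def pvDistStep (UL : List (List Int) × List (List Int)) (r : Bool × List Int) :
    List (List Int) × List (List Int) :=
  if r.1 then (pvExtendLast UL.1 r.2, UL.2) else (UL.1 ++ [[]], UL.2 ++ [r.2])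

def uLFac_alt (pi : List Int) (x : Int) : List (List Int) × List (List Int) :=
  let runs := pi.foldl (fun rs v => pvAddRun rs (decide (x ≤ v)) v) []
  runs.foldl pvDistStep ([[]], [])

-- ===== PRECONDITION & SPEC =====
-- Pre_ excludes only the empty list, on which A's initial next() raises StopIteration.
def Pre_uLFac (pi : List Int) (x : Int) : Prop := pi ≠ []
instance (pi : List Int) (x : Int) : Decidable (Pre_uLFac pi x) := by unfold Pre_uLFac; infer_instance
def pvWitness_uLFac : List Int × Int := ([1, -2, 3], 0)

-- On the empty list A raises StopIteration; B returns ([[]], []).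
def Raises_uLFac (pi : List Int) (x : Int) : Prop := pi = []
instance (pi : List Int) (x : Int) : Decidable (Raises_uLFac pi x) := by unfold Raises_uLFac; infer_instance
def pvRaiseWitness_uLFac : List Int × Int := ([], 0)
def pvRaiseWitnessOut_uLFac : List (List Int) × List (List Int) := ([[]], [])

def Spec_uLFac (pi : List Int) (x : Int) (out : List (List Int) × List (List Int)) : Prop := out = uLFac_alt pi x
instance (pi : List Int) (x : Int) (out : List (List Int) × List (List Int)) : Decidable (Spec_uLFac pi x out) := by unfold Spec_uLFac; infer_instance

-- ===== CLAIM (what is proved, stated in full; the proofs are below) =====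
def Claim_equal_uLFac : Prop := ∀ (pi : List Int) (x : Int), Dom_uLFac pi x → Pre_uLFac pi x → Spec_uLFac pi x (uLFac pi x)
def Claim_raises_uLFac : Prop := (∀ (pi : List Int) (x : Int), Dom_uLFac pi x → Raises_uLFac pi x → ¬ Pre_uLFac pi x) ∧ (Dom_uLFac (pvRaiseWitness_uLFac.1) (pvRaiseWitness_uLFac.2) ∧ Raises_uLFac (pvRaiseWitness_uLFac.1) (pvRaiseWitness_uLFac.2) ∧ uLFac_alt (pvRaiseWitness_uLFac.1) (pvRaiseWitness_uLFac.2) = pvRaiseWitnessOut_uLFac)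

-- ===== LEMMAS AND PROOFS =====

-- the effect of A's loop body on (U, L) for one consumed element with key k = (x ≤ v)
def pvStepA (phase k : Bool) (UL : List (List Int) × List (List Int)) (v : Int) :
    List (List Int) × List (List Int) :=
  if k then (pvPushLast UL.1 v, UL.2)
  else if phase then (UL.1 ++ [[]], UL.2 ++ [[v]])
  else (UL.1, pvPushLast UL.2 v)

-- phase A is in after the last run of `runs` (true if runs = [])
def pvPhase : List (Bool × List Int) → Bool
  | [] => true
  | [r] => r.1
  | _ :: s :: rs => pvPhase (s :: rs)

theorem pushLast_snoc (A : List (List Int)) (b : List Int) (v : Int) :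
    pvPushLast (A ++ [b]) v = A ++ [b ++ [v]] := by
  induction A with
  | nil => simp [pvPushLast]
  | cons a as ih =>
    cases as with
    | nil => simp [pvPushLast]
    | cons c cs => simpa [pvPushLast] using ih

theorem pushLast_cons (b : List Int) (X : List (List Int)) (v : Int) (h : X ≠ []) :
    pvPushLast (b :: X) v = b :: pvPushLast X v := by
  cases X with
  | nil => exact absurd rfl h
  | cons c cs => rfl

theorem extendLast_ne_nil (U : List (List Int)) (s : List Int) (h : U ≠ []) :
    pvExtendLast U s ≠ [] := by
  cases U with
  | nil => exact absurd rfl h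
  | cons b bs => cases bs <;> simp [pvExtendLast]

theorem extendLast_snoc (U : List (List Int)) (a : List Int) (v : Int) :
    pvExtendLast U (a ++ [v]) = pvPushLast (pvExtendLast U a) v := by
  induction U with
  | nil => simp [pvExtendLast, pvPushLast]
  | cons b bs ih =>
    cases bs with
    | nil => simp [pvExtendLast, pvPushLast]
    | cons c cs =>
      simp only [pvExtendLast]
      rw [pushLast_cons _ _ _ (extendLast_ne_nil _ _ (by simp)), ih]

theorem extendLast_single (U : List (List Int)) (v : Int) :
    pvExtendLast U [v] = pvPushLast U v := by
  induction U with
  | nil => simp [pvExtendLast, pvPushLast]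
  | cons b bs ih =>
    cases bs with
    | nil => simp [pvExtendLast, pvPushLast]
    | cons c cs => simpa [pvExtendLast, pvPushLast] using ih

theorem phase_addRun (runs : List (Bool × List Int)) (k : Bool) (v : Int) :
    pvPhase (pvAddRun runs k v) = k := by
  induction runs with
  | nil => simp [pvAddRun, pvPhase]
  | cons r rs ih =>
    cases rs with
    | nil =>
      by_cases h : r.1 = k <;> simp [pvAddRun, pvPhase, h]
    | cons s ss =>
      have : pvAddRun (s :: ss) k v ≠ [] := by
        cases ss with
        | nil => by_cases h : s.1 = k <;> simp [pvAddRun, h]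
        | cons t ts => simp [pvAddRun]
      simp only [pvAddRun]
      cases hh : pvAddRun (s :: ss) k v with
      | nil => exact absurd hh this
      | cons a as => rw [← hh]; simpa [pvPhase, hh] using ih

theorem dist_addRun (runs : List (Bool × List Int)) (s : List (List Int) × List (List Int))
    (k : Bool) (v : Int) :
    List.foldl pvDistStep s (pvAddRun runs k v)
      = pvStepA (pvPhase runs) k (List.foldl pvDistStep s runs) v := by
  induction runs generalizing s with
  | nil =>
    cases k <;> simp [pvAddRun, pvPhase, pvDistStep, pvStepA, extendLast_single]
  | cons r rs ih =>
    cases rs with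
    | nil =>
      by_cases h : r.1 = k
      · subst h
        cases hr : r.1 <;>
          simp [pvAddRun, pvPhase, pvDistStep, pvStepA, hr, extendLast_snoc, pushLast_snoc]
      · cases hr : r.1 <;> cases hk : k <;> simp_all <;>
          simp [pvAddRun, pvPhase, pvDistStep, pvStepA, hr, extendLast_single]
    | cons t ts =>
      simp only [pvAddRun, List.foldl_cons, pvPhase]
      exact ih (pvDistStep s r)

-- one-step unfolding of A's loop
theorem go_true_ge (x val : Int) (rest : List Int) (U L : List (List Int)) (h : x ≤ val) :
    uLFacGo x true val rest U L
      = (match rest with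
         | [] => (pvPushLast U val, L)
         | v :: rs => uLFacGo x true v rs (pvPushLast U val) L) := by
  rw [uLFacGo.eq_def]; cases rest <;> simp [h]

theorem go_true_lt (x val : Int) (rest : List Int) (U L : List (List Int)) (h : val < x) :
    uLFacGo x true val rest U L = uLFacGo x false val rest (U ++ [[]]) (L ++ [[]]) := by
  rw [uLFacGo.eq_def]; simp [show ¬ x ≤ val from not_le.mpr h]

theorem go_false_lt (x val : Int) (rest : List Int) (U L : List (List Int)) (h : val < x) :
    uLFacGo x false val rest U L
      = (match rest with
         | [] => (U, pvPushLast L val)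
         | v :: rs => uLFacGo x false v rs U (pvPushLast L val)) := by
  rw [uLFacGo.eq_def]; cases rest <;> simp [h]

theorem go_false_ge (x val : Int) (rest : List Int) (U L : List (List Int)) (h : x ≤ val) :
    uLFacGo x false val rest U L = uLFacGo x true val rest U L := by
  conv_lhs => rw [uLFacGo.eq_def]
  simp [show ¬ val < x from not_lt.mpr h]

theorem go_step (x : Int) (phase : Bool) (val : Int) (rest : List Int)
    (U L : List (List Int)) :
    uLFacGo x phase val rest U L
      = (match rest with
         | [] => pvStepA phase (decide (x ≤ val)) (U, L) val
         | v :: rs =>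
             uLFacGo x (decide (x ≤ val)) v rs
               (pvStepA phase (decide (x ≤ val)) (U, L) val).1
               (pvStepA phase (decide (x ≤ val)) (U, L) val).2) := by
  by_cases h : x ≤ val
  · cases phase
    · rw [go_false_ge x val rest U L h, go_true_ge x val rest U L h]
      cases rest <;> simp [h, pvStepA]
    · rw [go_true_ge x val rest U L h]
      cases rest <;> simp [h, pvStepA]
  · have h' : val < x := lt_of_not_ge h
    cases phase
    · rw [go_false_lt x val rest U L h']
      cases rest <;> simp [h, pvStepA]
    · rw [go_true_lt x val rest U L h', go_false_lt x val rest (U ++ [[]]) (L ++ [[]]) h']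
      cases rest <;> simp [h, pvStepA, pushLast_snoc]

-- main simulation: A's loop from the state distributed from `runs` computes
-- the distribution of B's runs of the whole remaining input
theorem go_dist (x : Int) (rest : List Int) (val : Int) (runs : List (Bool × List Int)) :
    uLFacGo x (pvPhase runs) val rest
        (List.foldl pvDistStep ([[]], []) runs).1
        (List.foldl pvDistStep ([[]], []) runs).2
      = List.foldl pvDistStep ([[]], [])
          (List.foldl (fun rs v => pvAddRun rs (decide (x ≤ v)) v) runs (val :: rest)) := by
  induction rest generalizing val runs with
  | nil =>
    rw [go_step]
    simp [dist_addRun]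
  | cons v rs ih =>
    rw [go_step]
    simp only [List.foldl_cons]
    have := ih v (pvAddRun runs (decide (x ≤ val)) val)
    rw [phase_addRun, dist_addRun] at this
    exact this

-- ===== VERDICT (by name: the statement is the Claim_ definition above) =====
theorem uLFac_spec : Claim_equal_uLFac := by
  intro pi x _ hpre
  unfold Spec_uLFac uLFac uLFac_alt
  cases pi with
  | nil => exact absurd rfl hpre
  | cons v rs =>
    simpa using go_dist x rs v []

@[simp] theorem uLFac_raises : Claim_raises_uLFac := by
  unfold Claim_raises_uLFac
  exact ⟨fun pi x _ hr hp => hp hr, by decide⟩
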